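-- pv_equiv track=rewrite | github.com/seimei-d/systemrdl-pro | packages/systemrdl-lsp/src/systemrdl_lsp/compile.py | _canonicalize_for_skip
-- ===== SOURCE A (Python) =====
-- def _canonicalize_for_skip(text: str) -> str:
--     """Return a normalized form that strips comments and collapses non-string
--     whitespace. Two buffers with the same canonical form will produce
--     identical AST out of ``systemrdl-compiler``, so we can skip elaborate
--     entirely (no banner, no version bump, no notification).
--
--     Token-aware enough not to corrupt:
--
--     - Quoted strings (``"hello world"`` keeps both spaces).
--     - Line comments (``//`` and ``#`` — Perl preprocessor markers ``<%``
--       / ``%>`` are NOT comments; left untouched so a Perl-section edit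
--       still triggers re-elaborate).
--     - Block comments (``/* ... */``).
--     - Backticks for ```include`` / ```define`` (preserved literally; the
--       directive itself is whitespace-collapsed normally).
--
--     Edits this catches as no-ops:
--
--     - Reformatting (extra blank lines, indent changes).
--     - Adding / removing / editing comments.
--     - Trailing whitespace.
--
--     Edits this does NOT catch as no-ops:
--
--     - Anything that touches a string literal (even adding a single
--       space inside ``"foo bar"``).
--     - Identifier renames (``REG_488`` → ``REG_4888`` differ in
--       canonical form).
--     - Perl preprocessor section changes.
--
--     The check runs in ``_full_pass_async`` between the exact-equality
--     short-circuit and ``_compile_text`` — adds one O(n) string scan per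
--     edit. ~50µs on a 1MB buffer; saves seconds when it matches.
--     """
--     if not text:
--         return ""
--     out: list[str] = []
--     i = 0
--     n = len(text)
--     last_was_space = True  # leading whitespace gets stripped
--     while i < n:
--         c = text[i]
--         # Quoted string — copy literally, never collapse internal whitespace.
--         if c == '"':
--             j = i + 1
--             while j < n:
--                 if text[j] == "\\" and j + 1 < n:
--                     j += 2
--                     continue
--                 if text[j] == '"':
--                     j += 1
--                     break
--                 j += 1
--             out.append(text[i:j])
--             last_was_space = False
--             i = j
--             continue
--         # Line comment // ... \n
--         if c == "/" and i + 1 < n and text[i + 1] == "/":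
--             while i < n and text[i] != "\n":
--                 i += 1
--             continue
--         # Line comment # ... \n  (RDL allows '#' comments inside Perl
--         # context only, but stripping it everywhere is safe — the
--         # compiler would treat a stray '#' outside Perl as an error
--         # both before and after stripping, so the canonical comparison
--         # stays consistent with the compiler's actual behaviour.)
--         if c == "#":
--             while i < n and text[i] != "\n":
--                 i += 1
--             continue
--         # Block comment /* ... */
--         if c == "/" and i + 1 < n and text[i + 1] == "*":
--             j = i + 2
--             while j + 1 < n and not (text[j] == "*" and text[j + 1] == "/"):
--                 j += 1
--             i = min(n, j + 2)
--             continue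
--         # Whitespace run → single space (or nothing at start/end).
--         if c.isspace():
--             if not last_was_space:
--                 out.append(" ")
--                 last_was_space = True
--             i += 1
--             continue
--         out.append(c)
--         last_was_space = False
--         i += 1
--     # Trim trailing space if we left one.
--     if out and out[-1] == " ":
--         out.pop()
--     return "".join(out)
-- ===== SOURCE B (Python) =====
-- def _canonicalize_for_skip(text: str) -> str:
--     """Tokenize once (strings verbatim, comments dropped, a single " " per
--     whitespace run, maximal plain-character runs), then render the tokens
--     with space collapsing and a trailing-space trim."""
--     parts: list[str] = []
--     for tok in _skip_tokens(text):
--         if tok == " ":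
--             if parts and parts[-1] != " ":
--                 parts.append(" ")
--         else:
--             parts.append(tok)
--     if parts and parts[-1] == " ":
--         parts.pop()
--     return "".join(parts)
--
--
-- def _skip_tokens(text):
--     i, n = 0, len(text)
--     while i < n:
--         c = text[i]
--         if c == '"':
--             j = i + 1
--             while j < n:
--                 if text[j] == "\\" and j + 1 < n:
--                     j += 2
--                 elif text[j] == '"':
--                     j += 1
--                     break
--                 else:
--                     j += 1
--             yield text[i:j]
--             i = j
--         elif text.startswith("//", i) or c == "#":
--             j = text.find("\n", i)
--             i = n if j < 0 else j
--         elif text.startswith("/*", i):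
--             j = text.find("*/", i + 2)
--             i = n if j < 0 else j + 2
--         elif c.isspace():
--             while i < n and text[i].isspace():
--                 i += 1
--             yield " "
--         else:
--             j = i
--             while j < n and not (text[j] in '"#'
--                                  or text[j].isspace()
--                                  or text.startswith("//", j)
--                                  or text.startswith("/*", j)):
--                 j += 1
--             yield text[i:j]
--             i = j
-- ===== Notes on version B (the rewrite author's own statement) =====
-- stated objective: alternative
-- what changed: Replaces A's single character-by-character state-machine loop (last_was_space flag interleaved with scanning) by a two-phase design: a tokenizer that emits whole tokens (string literals, one " " per whitespace run, maximal plain-character runs, comments dropped, comment bodies skipped via str.find), followed by a separate rendering pass that collapses space tokens and trims the tail.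
import Mathlib
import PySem

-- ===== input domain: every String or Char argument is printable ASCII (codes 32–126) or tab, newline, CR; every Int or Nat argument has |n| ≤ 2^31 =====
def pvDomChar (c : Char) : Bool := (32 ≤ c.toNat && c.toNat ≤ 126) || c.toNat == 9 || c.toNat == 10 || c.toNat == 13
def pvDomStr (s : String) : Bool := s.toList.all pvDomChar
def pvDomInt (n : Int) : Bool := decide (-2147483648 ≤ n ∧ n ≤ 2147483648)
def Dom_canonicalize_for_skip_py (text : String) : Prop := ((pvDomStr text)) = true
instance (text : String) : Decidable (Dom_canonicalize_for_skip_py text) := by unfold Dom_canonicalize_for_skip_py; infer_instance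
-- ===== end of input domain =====

-- B restructures A's single flag-carrying character loop into tokenize-then-render; same output, similar cost (objective: alternative).

-- ===== PORT A =====
-- A's inner string scanner (the `while j < n` loop after a '"'): returns the
-- consumed characters after the opening quote and the remaining suffix.
def aScanStr : List Char → List Char × List Char
  | [] => ([], [])
  | '\\' :: d :: r => let p := aScanStr r; ('\\' :: d :: p.1, p.2)
  | '"' :: r => (['"'], r)
  | c :: r => let p := aScanStr r; (c :: p.1, p.2)

-- A's block-comment scanner: `while j+1<n and not (text[j]=='*' and text[j+1]=='/')`,
-- then `i = min(n, j+2)`; called on the suffix after "/*".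
def aSkipBlock : List Char → List Char
  | [] => []
  | [_] => []
  | '*' :: '/' :: r => r
  | _ :: r => aSkipBlock r

theorem aScanStr_snd_le : ∀ l : List Char, (aScanStr l).2.length ≤ l.length := by
  intro l
  induction l using aScanStr.induct <;> simp_all [aScanStr] <;> omega

theorem aSkipBlock_le : ∀ l : List Char, (aSkipBlock l).length ≤ l.length := by
  intro l
  induction l using aSkipBlock.induct <;> simp_all [aSkipBlock] <;> omega

-- A's main `while i < n` loop over the remaining suffix of the text, with the
-- `last_was_space` flag; produces Python's `out` list of appended strings.
def aLoop (l : List Char) (lws : Bool) : List (List Char) :=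
  match l with
  | [] => []
  | c :: rest =>
    if c = '"' then
      let p := aScanStr rest
      ('"' :: p.1) :: aLoop p.2 false
    else if c = '/' ∧ rest.head? = some '/' then
      -- `while i < n and text[i] != '\n'` (the leading "//" chars are not '\n')
      aLoop (rest.dropWhile (fun x => x ≠ '\n')) lws
    else if c = '#' then
      aLoop (rest.dropWhile (fun x => x ≠ '\n')) lws
    else if c = '/' ∧ rest.head? = some '*' then
      aLoop (aSkipBlock rest.tail) lws
    else if PySem.Chars.isspace c then
      if lws then aLoop rest true else [' '] :: aLoop rest true
    else
      [c] :: aLoop rest false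
termination_by l.length
decreasing_by
  · have := aScanStr_snd_le rest; simp; omega
  · simp; have := List.length_dropWhile_le (fun x => !decide (x = '\n')) rest; omega
  · simp; have := List.length_dropWhile_le (fun x => !decide (x = '\n')) rest; omega
  · have h1 := aSkipBlock_le rest.tail
    have h2 : rest.tail.length ≤ rest.length := by cases rest <;> simp
    simp; omega
  · simp
  · simp
  · simp

def canonicalize_for_skip_py (text : String) : String :=
  let out := aLoop text.toList true
  -- `if out and out[-1] == " ": out.pop()`
  let out2 := if out.getLast? = some [' '] then out.dropLast else out
  String.ofList out2.flatten

-- ===== PORT B =====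
-- Source B's string scanner inside `_skip_tokens` (same inner loop shape as the source).
def bScanStr : List Char → List Char × List Char
  | [] => ([], [])
  | '\\' :: d :: r => let p := bScanStr r; ('\\' :: d :: p.1, p.2)
  | '"' :: r => (['"'], r)
  | c :: r => let p := bScanStr r; (c :: p.1, p.2)

-- Source B's `text.find("*/", i + 2)` with `i = n if j < 0 else j + 2`, as a scan of the suffix.
def bSkipBlock : List Char → List Char
  | '*' :: '/' :: r => r
  | _ :: r => bSkipBlock r
  | [] => []

-- Source B's word-run loop: take characters until '"', '#', whitespace, "//" or "/*".
def bSpanWord : List Char → List Char × List Char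
  | [] => ([], [])
  | c :: r =>
    if c = '"' ∨ c = '#' ∨ PySem.Chars.isspace c ∨
        (c = '/' ∧ (r.head? = some '/' ∨ r.head? = some '*')) then ([], c :: r)
    else let p := bSpanWord r; (c :: p.1, p.2)

theorem bScanStr_snd_le : ∀ l : List Char, (bScanStr l).2.length ≤ l.length := by
  intro l
  induction l using bScanStr.induct <;> simp_all [bScanStr] <;> omega

theorem bSkipBlock_le : ∀ l : List Char, (bSkipBlock l).length ≤ l.length := by
  intro l
  induction l using bSkipBlock.induct <;> simp_all [bSkipBlock] <;> omega

theorem bSpanWord_snd_le : ∀ l : List Char, (bSpanWord l).2.length ≤ l.length := by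
  intro l
  induction l using bSpanWord.induct <;> simp_all [bSpanWord] <;> split <;> simp_all <;> omega

-- Source B's `_skip_tokens` generator: the list of yielded tokens.
-- (For a whitespace run and for a word run the first character is already known
-- to be of that kind, so the scan continues on the tail.)
def bTokens (l : List Char) : List (List Char) :=
  match l with
  | [] => []
  | c :: rest =>
    if c = '"' then
      let p := bScanStr rest
      ('"' :: p.1) :: bTokens p.2
    else if (c = '/' ∧ rest.head? = some '/') ∨ c = '#' then
      bTokens (rest.dropWhile (fun x => x ≠ '\n'))
    else if c = '/' ∧ rest.head? = some '*' then
      bTokens (bSkipBlock rest.tail)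
    else if PySem.Chars.isspace c then
      [' '] :: bTokens (rest.dropWhile (fun x => PySem.Chars.isspace x))
    else
      let p := bSpanWord rest
      (c :: p.1) :: bTokens p.2
termination_by l.length
decreasing_by
  · have := bScanStr_snd_le rest; simp; omega
  · simp; have := List.length_dropWhile_le (fun x => !decide (x = '\n')) rest; omega
  · have h1 := bSkipBlock_le rest.tail
    have h2 : rest.tail.length ≤ rest.length := by cases rest <;> simp
    simp; omega
  · have := List.length_dropWhile_le (fun x => PySem.Chars.isspace x) rest; simp; omega
  · have := bSpanWord_snd_le rest; simp; omega

-- Source B's rendering loop body: `if tok == " ": ... else: parts.append(tok)`.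
def bStep (parts : List (List Char)) (t : List Char) : List (List Char) :=
  if t = [' '] then
    if parts ≠ [] ∧ parts.getLast? ≠ some [' '] then parts ++ [[' ']] else parts
  else parts ++ [t]

def canonicalize_for_skip_py_alt (text : String) : String :=
  let parts := (bTokens text.toList).foldl bStep []
  -- `if parts and parts[-1] == " ": parts.pop()`
  let parts2 := if parts.getLast? = some [' '] then parts.dropLast else parts
  String.ofList parts2.flatten

-- ===== PRECONDITION & SPEC =====
def Spec_canonicalize_for_skip_py (text : String) (out : String) : Prop := out = canonicalize_for_skip_py_alt text
instance (text : String) (out : String) : Decidable (Spec_canonicalize_for_skip_py text out) := by unfold Spec_canonicalize_for_skip_py; infer_instance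

-- ===== CLAIM (what is proved, stated in full; the proofs are below) =====
def Claim_equal_canonicalize_for_skip_py : Prop := ∀ (text : String), Dom_canonicalize_for_skip_py text → Spec_canonicalize_for_skip_py text (canonicalize_for_skip_py text)

-- ===== LEMMAS AND PROOFS =====

theorem scanStr_eq : ∀ l, aScanStr l = bScanStr l := by
  intro l
  induction l using aScanStr.induct <;> simp_all [aScanStr, bScanStr]

theorem skipBlock_eq : ∀ l, aSkipBlock l = bSkipBlock l := by
  intro l
  induction l using aSkipBlock.induct <;> simp_all [aSkipBlock, bSkipBlock]

-- Space-collapsing of a token stream (the produced-list form of Source B's render loop).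
def collapse : List (List Char) → Bool → List (List Char)
  | [], _ => []
  | t :: ts, lws =>
    if t = [' '] then
      if lws then collapse ts true else [' '] :: collapse ts true
    else t :: collapse ts false

theorem foldl_bStep (ts : List (List Char)) :
    ∀ parts : List (List Char),
      ts.foldl bStep parts
        = parts ++ collapse ts (parts.isEmpty || parts.getLast? == some [' ']) := by
  induction ts with
  | nil => intro parts; simp [collapse]
  | cons t ts ih =>
    intro parts
    simp only [List.foldl_cons]
    by_cases ht : t = [' ']
    · subst ht
      by_cases hc : parts ≠ [] ∧ parts.getLast? ≠ some [' ']
      · have hstep : bStep parts [' '] = parts ++ [[' ']] := by simp [bStep, hc]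
        have hflag : (parts.isEmpty || parts.getLast? == some [' ']) = false := by
          simp [hc.1, hc.2]
        rw [hstep, ih, collapse, hflag]
        simp
      · have hstep : bStep parts [' '] = parts := by
          simp [bStep, hc]
        have hflag : (parts.isEmpty || parts.getLast? == some [' ']) = true := by
          rcases not_and_or.mp hc with h | h
          · simp [not_not.mp h]
          · simp [not_not.mp h]
        rw [hstep, ih, collapse, hflag]
        simp
    · have hstep : bStep parts t = parts ++ [t] := by simp [bStep, ht]
      rw [hstep, ih, collapse]
      have h1 : (parts ++ [t]).getLast? = some t := List.getLast?_concat
      have harg : ((parts ++ [t]).isEmpty || (parts ++ [t]).getLast? == some [' ']) = false := by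
        simp [h1, ht]
      rw [harg]
      simp
      exact fun h => absurd h ht

-- Token lists that render to the same string: equal flattenings, the same
-- "last token is the collapsed space" status, and simultaneous emptiness.
def TokEquiv (X Y : List (List Char)) : Prop :=
  X.flatten = Y.flatten ∧ (X.getLast? = some [' '] ↔ Y.getLast? = some [' ']) ∧ (X = [] ↔ Y = [])

theorem tokEquiv_nil : TokEquiv [] [] := by
  simp [TokEquiv]

theorem tokEquiv_cons (t : List Char) {X Y : List (List Char)} (h : TokEquiv X Y) :
    TokEquiv (t :: X) (t :: Y) := by
  obtain ⟨f, g, e⟩ := h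
  cases X with
  | nil =>
    have hY : Y = [] := e.mp rfl
    subst hY
    exact ⟨rfl, Iff.rfl, by simp⟩
  | cons x xs =>
    cases Y with
    | nil => exact absurd (e.mpr rfl) (by simp)
    | cons y ys =>
      exact ⟨by simpa using f, by simpa [List.getLast?_cons_cons] using g, by simp⟩

theorem tokEquiv_cons_word (c : Char) {t : List Char} {X Z : List (List Char)}
    (ht : t ≠ []) (ht' : t ≠ [' ']) (h : TokEquiv X (t :: Z)) :
    TokEquiv ([c] :: X) ((c :: t) :: Z) := by
  obtain ⟨f, g, e⟩ := h
  cases X with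
  | nil => exact absurd (e.mp rfl) (by simp)
  | cons x xs =>
    refine ⟨?_, ?_, by simp⟩
    · simp only [List.flatten_cons] at f ⊢
      simp [f]
    · rw [List.getLast?_cons_cons]
      cases Z with
      | nil =>
        simp only [List.getLast?_singleton, Option.some.injEq] at g ⊢
        constructor
        · intro hx; exact absurd (g.mp hx) ht'
        · intro hct
          simp only [List.cons.injEq] at hct
          exact absurd hct.2 ht
      | cons z zs =>
        rw [List.getLast?_cons_cons]
        rw [List.getLast?_cons_cons] at g
        exact g

theorem aLoop_dropSpaces : ∀ l : List Char,
    aLoop (l.dropWhile (fun x => PySem.Chars.isspace x)) true = aLoop l true := by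
  intro l
  induction l with
  | nil => rfl
  | cons c rest ih =>
    by_cases hc : PySem.Chars.isspace c = true
    · rw [List.dropWhile_cons_of_pos (by simpa using hc), ih]
      have h1 : ¬ c = '"' := by rintro rfl; exact absurd hc (by decide)
      have h2 : ¬ (c = '/' ∧ rest.head? = some '/') := by
        rintro ⟨rfl, -⟩; exact absurd hc (by decide)
      have h3 : ¬ c = '#' := by rintro rfl; exact absurd hc (by decide)
      have h4 : ¬ (c = '/' ∧ rest.head? = some '*') := by
        rintro ⟨rfl, -⟩; exact absurd hc (by decide)
      conv_rhs => rw [aLoop]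
      simp [h1, h2, h3, h4, hc]
    · rw [List.dropWhile_cons_of_neg (by simpa using hc)]

theorem main_equiv : ∀ (n : Nat) (l : List Char) (lws : Bool), l.length ≤ n →
    TokEquiv (aLoop l lws) (collapse (bTokens l) lws) := by
  intro n
  induction n with
  | zero =>
    intro l lws h
    have hl : l = [] := List.eq_nil_of_length_eq_zero (Nat.le_zero.mp h)
    subst hl
    simp only [aLoop, bTokens, collapse]
    exact tokEquiv_nil
  | succ n ih =>
    intro l lws hlen
    cases l with
    | nil =>
      simp only [aLoop, bTokens, collapse]
      exact tokEquiv_nil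
    | cons c rest =>
      have hlen' : rest.length ≤ n := by simpa using hlen
      rw [aLoop, bTokens]
      by_cases h1 : c = '"'
      · rw [if_pos h1, if_pos h1, ← scanStr_eq, collapse, if_neg (by simp)]
        exact tokEquiv_cons _ (ih _ _ (le_trans (aScanStr_snd_le rest) hlen'))
      · rw [if_neg h1, if_neg h1]
        by_cases h2 : c = '/' ∧ rest.head? = some '/'
        · rw [if_pos h2, if_pos (Or.inl h2)]
          exact ih _ _ (le_trans (List.length_dropWhile_le _ rest) hlen')
        · rw [if_neg h2]
          by_cases h3 : c = '#'
          · rw [if_pos h3, if_pos (Or.inr h3)]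
            exact ih _ _ (le_trans (List.length_dropWhile_le _ rest) hlen')
          · rw [if_neg h3,
              if_neg (show ¬((c = '/' ∧ rest.head? = some '/') ∨ c = '#') by tauto)]
            by_cases h4 : c = '/' ∧ rest.head? = some '*'
            · rw [if_pos h4, if_pos h4, ← skipBlock_eq]
              have hle : (aSkipBlock rest.tail).length ≤ n :=
                le_trans (aSkipBlock_le rest.tail)
                  (le_trans (by cases rest <;> simp) hlen')
              exact ih _ _ hle
            · rw [if_neg h4, if_neg h4]
              by_cases h5 : PySem.Chars.isspace c = true
              · rw [if_pos h5, if_pos h5, collapse, if_pos rfl]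
                have hA : aLoop rest true
                    = aLoop (rest.dropWhile (fun x => PySem.Chars.isspace x)) true :=
                  (aLoop_dropSpaces rest).symm
                have hIH := ih (rest.dropWhile (fun x => PySem.Chars.isspace x)) true
                  (le_trans (List.length_dropWhile_le _ rest) hlen')
                cases lws with
                | true => simpa [hA] using hIH
                | false => simpa [hA] using tokEquiv_cons [' '] hIH
              · rw [if_neg h5, if_neg h5]
                have hc' : c ≠ ' ' := by rintro rfl; exact absurd (by decide) h5
                cases rest with
                | nil =>
                  rw [show bSpanWord [] = ([], []) from rfl]
                  dsimp only
                  rw [collapse, if_neg (by simp [hc'])]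
                  simp only [aLoop, bTokens, collapse]
                  exact tokEquiv_cons _ tokEquiv_nil
                | cons c2 rest2 =>
                  by_cases hstop : c2 = '"' ∨ c2 = '#' ∨ PySem.Chars.isspace c2 = true ∨
                      (c2 = '/' ∧ (rest2.head? = some '/' ∨ rest2.head? = some '*'))
                  · rw [show bSpanWord (c2 :: rest2) = ([], c2 :: rest2) from by
                      rw [bSpanWord, if_pos hstop]]
                    dsimp only
                    rw [collapse, if_neg (by simp [hc'])]
                    exact tokEquiv_cons _ (ih _ _ hlen')
                  · simp only [not_or, not_and_or] at hstop
                    obtain ⟨g1, g2, g3, g4⟩ := hstop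
                    have hc2 : c2 ≠ ' ' := by rintro rfl; exact absurd (by decide) g3
                    have hsw : bSpanWord (c2 :: rest2)
                        = (c2 :: (bSpanWord rest2).1, (bSpanWord rest2).2) := by
                      rw [bSpanWord, if_neg (by tauto)]
                    have hbt : bTokens (c2 :: rest2)
                        = (c2 :: (bSpanWord rest2).1) :: bTokens (bSpanWord rest2).2 := by
                      rw [bTokens, if_neg g1, if_neg (by tauto), if_neg (by tauto),
                        if_neg g3]
                    have hIH := ih (c2 :: rest2) false hlen'
                    rw [hbt, collapse, if_neg (by simp [hc2])] at hIH
                    rw [hsw]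
                    dsimp only
                    rw [collapse, if_neg (by simp [hc'])]
                    exact tokEquiv_cons_word c (by simp) (by simp [hc2]) hIH

theorem flatten_dropLast_aux : ∀ X : List (List Char), X.getLast? = some [' '] →
    X.dropLast.flatten = X.flatten.dropLast ∧ X.flatten ≠ [] := by
  intro X
  induction X with
  | nil => simp
  | cons t X ih =>
    intro h
    cases X with
    | nil =>
      simp only [List.getLast?_singleton, Option.some.injEq] at h
      subst h
      simp
    | cons u Xs =>
      have h' : (u :: Xs).getLast? = some [' '] := by rwa [List.getLast?_cons_cons] at h
      obtain ⟨ih1, ih2⟩ := ih h'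
      constructor
      · show (t :: (u :: Xs).dropLast).flatten = ((t :: (u :: Xs)).flatten).dropLast
        rw [List.flatten_cons, List.flatten_cons, List.dropLast_append_of_ne_nil ih2, ih1]
      · simp only [List.flatten_cons]
        intro hcon
        exact ih2 (List.append_eq_nil_iff.mp hcon).2

theorem flatten_dropLast {X : List (List Char)} (h : X.getLast? = some [' ']) :
    X.dropLast.flatten = X.flatten.dropLast := (flatten_dropLast_aux X h).1

-- ===== VERDICT (by name: the statement is the Claim_ definition above) =====
theorem canonicalize_for_skip_py_spec : Claim_equal_canonicalize_for_skip_py := by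
  intro text _
  unfold Spec_canonicalize_for_skip_py canonicalize_for_skip_py canonicalize_for_skip_py_alt
  have hfold := foldl_bStep (bTokens text.toList) []
  simp only [List.isEmpty_nil, List.getLast?_nil, Bool.true_or, List.nil_append] at hfold
  rw [hfold]
  dsimp only
  obtain ⟨h1, h2, _⟩ := main_equiv text.toList.length text.toList true le_rfl
  by_cases hsp : (aLoop text.toList true).getLast? = some [' ']
  · have hsp' : (collapse (bTokens text.toList) true).getLast? = some [' '] := h2.mp hsp
    rw [if_pos hsp, if_pos hsp', flatten_dropLast hsp, flatten_dropLast hsp', h1]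
  · have hsp' := (not_congr h2).mp hsp
    rw [if_neg hsp, if_neg hsp', h1]
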